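-- pv_equiv track=rewrite | github.com/Kwan-Lab/aboharbdavoudian2025 | functionScripts/helperFunctions.py | replace_ones_with_integers
-- ===== SOURCE A (Python) =====
-- def replace_ones_with_integers(binary_vector, integer_array):
--     result = []
--     integer_index = 0
--
--     for element in binary_vector:
--         if element == 1:
--             if integer_index < len(integer_array):
--                 result.append(integer_array[integer_index])
--                 integer_index += 1
--             else:
--                 raise ValueError(
--                     "Not enough integers in the integer_array to replace all ones")
--         else:
--             result.append(0)
--
--     return result
-- ===== SOURCE B (Python) =====
-- def replace_ones_with_integers(binary_vector, integer_array):
--     ones_positions = [i for i, x in enumerate(binary_vector) if x == 1]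
--     if len(ones_positions) > len(integer_array):
--         raise ValueError(
--             "Not enough integers in the integer_array to replace all ones")
--     result = [0] * len(binary_vector)
--     for pos, val in zip(ones_positions, integer_array):
--         result[pos] = val
--     return result
-- ===== Notes on version B (the rewrite author's own statement) =====
-- stated objective: alternative
-- what changed: Replaces A's fused sequential loop with a running index by a positions-then-scatter algorithm: collect the indices of all ones, validate the count, preallocate a zero list, then scatter the integers into those positions via zip and random-access assignment.
import Mathlib
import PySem

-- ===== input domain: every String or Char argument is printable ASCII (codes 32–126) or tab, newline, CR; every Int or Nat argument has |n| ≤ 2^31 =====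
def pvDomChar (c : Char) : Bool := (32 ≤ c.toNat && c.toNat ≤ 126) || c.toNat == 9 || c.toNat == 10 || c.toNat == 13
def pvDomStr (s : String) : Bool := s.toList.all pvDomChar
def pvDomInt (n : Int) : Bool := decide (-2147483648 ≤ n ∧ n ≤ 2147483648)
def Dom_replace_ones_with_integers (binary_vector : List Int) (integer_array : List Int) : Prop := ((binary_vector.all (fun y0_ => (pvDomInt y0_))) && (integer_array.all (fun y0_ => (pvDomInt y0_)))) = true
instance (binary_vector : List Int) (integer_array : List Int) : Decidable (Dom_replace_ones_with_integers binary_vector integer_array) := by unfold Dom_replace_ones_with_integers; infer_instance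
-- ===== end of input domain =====

-- B replaces A's fused sequential loop (running index into integer_array) by a
-- positions-then-scatter algorithm: collect the indices of the ones, validate the
-- count, then scatter the integers into a preallocated zero list; equivalence is
-- proved on inputs where A does not raise.


-- ===== PORT A =====
-- the for-loop of A: recursion over binary_vector carrying integer_index;
-- `none` marks the `raise ValueError` branch (excluded by Pre_)
def pvGoA (integer_array : List Int) : List Int → Nat → Option (List Int)
  | [], _ => some []
  | x :: xs, idx =>
    if x == 1 then
      if idx < integer_array.length then
        (pvGoA integer_array xs (idx + 1)).map (integer_array.getD idx 0 :: ·)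
      else none
    else (pvGoA integer_array xs idx).map ((0 : Int) :: ·)

def replace_ones_with_integers (binary_vector : List Int) (integer_array : List Int) : List Int :=
  (pvGoA integer_array binary_vector 0).getD []

-- ===== PORT B =====
-- Source B step for step: positions of the ones, count check, zero preallocation,
-- scatter via zip.  `result[pos] = val` is `List.set pos.toNat val`; exact here
-- because enumerate's indices are nonnegative and in range.
def replace_ones_with_integers_alt (binary_vector : List Int) (integer_array : List Int) : List Int :=
  let ones_positions := ((PySem.List.enumerate binary_vector).filter (fun p => p.2 == 1)).map Prod.fst
  if integer_array.length < ones_positions.length then []   -- B raises ValueError here (outside Pre_)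
  else (ones_positions.zip integer_array).foldl
        (fun r pv => r.set pv.1.toNat pv.2) (List.replicate binary_vector.length 0)

-- ===== PRECONDITION & SPEC =====
-- Pre_ excludes exactly the inputs with more ones than available integers, on which
-- both A and B raise ValueError.
def Pre_replace_ones_with_integers (binary_vector : List Int) (integer_array : List Int) : Prop :=
  binary_vector.count 1 ≤ integer_array.length
instance (binary_vector : List Int) (integer_array : List Int) : Decidable (Pre_replace_ones_with_integers binary_vector integer_array) := by unfold Pre_replace_ones_with_integers; infer_instance

def pvWitness_replace_ones_with_integers : List Int × List Int := ([1, 0, 1], [7, 8])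

def Spec_replace_ones_with_integers (binary_vector : List Int) (integer_array : List Int) (out : List Int) : Prop := out = replace_ones_with_integers_alt binary_vector integer_array
instance (binary_vector : List Int) (integer_array : List Int) (out : List Int) : Decidable (Spec_replace_ones_with_integers binary_vector integer_array out) := by unfold Spec_replace_ones_with_integers; infer_instance

-- ===== CLAIM (what is proved, stated in full; the proofs are below) =====
def Claim_equal_replace_ones_with_integers : Prop := ∀ (binary_vector : List Int) (integer_array : List Int), Dom_replace_ones_with_integers binary_vector integer_array → Pre_replace_ones_with_integers binary_vector integer_array → Spec_replace_ones_with_integers binary_vector integer_array (replace_ones_with_integers binary_vector integer_array)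

-- ===== LEMMAS AND PROOFS =====
-- common reference value: the intended result, defined structurally
def pvSpec : List Int → List Int → List Int
  | [], _ => []
  | x :: xs, ia =>
    if x == 1 then
      match ia with
      | v :: rest => v :: pvSpec xs rest
      | [] => []
    else (0 : Int) :: pvSpec xs ia

-- positions of the ones, with an arbitrary start index
def pvPos (bv : List Int) (s : Int) : List Int :=
  ((PySem.List.enumerate bv s).filter (fun p => p.2 == 1)).map Prod.fst

lemma pvPos_cons (x : Int) (xs : List Int) (s : Int) :
    pvPos (x :: xs) s = if x == 1 then s :: pvPos xs (s + 1) else pvPos xs (s + 1) := by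
  simp only [pvPos, PySem.List.enumerate_cons, List.filter_cons]
  by_cases h : x = 1 <;> simp [h]

lemma pvPos_length (bv : List Int) (s : Int) : (pvPos bv s).length = bv.count 1 := by
  induction bv generalizing s with
  | nil => simp [pvPos]
  | cons x xs ih =>
    rw [pvPos_cons]
    by_cases h : x = 1 <;> simp [h, ih]

lemma set_mid (pref L : List Int) (a v : Int) :
    (pref ++ a :: L).set pref.length v = pref ++ v :: L := by
  induction pref with
  | nil => simp
  | cons p ps ih => simp [ih]

-- A's loop computes pvSpec (given enough integers)
lemma pvGoA_eq_spec (bv ia : List Int) :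
    ∀ idx : Nat, idx ≤ ia.length → bv.count 1 + idx ≤ ia.length →
      pvGoA ia bv idx = some (pvSpec bv (ia.drop idx)) := by
  induction bv with
  | nil => intro idx _ _; simp [pvGoA, pvSpec]
  | cons x xs ih =>
    intro idx hidx hcnt
    by_cases hx : x = 1
    · subst hx
      have hc : xs.count 1 + (idx + 1) ≤ ia.length := by
        simp at hcnt; omega
      have hlt : idx < ia.length := by omega
      have hdrop : ia.drop idx = ia[idx] :: ia.drop (idx + 1) :=
        List.drop_eq_getElem_cons hlt
      simp only [pvGoA, pvSpec, if_pos hlt, beq_self_eq_true, if_pos,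
        ih (idx + 1) (by omega) hc, Option.map_some, hdrop]
      simp [List.getD_eq_getElem?_getD, List.getElem?_eq_getElem hlt]
    · have hc : xs.count 1 + idx ≤ ia.length := by
        simp [hx] at hcnt ⊢; omega
      have hx' : (x == 1) = false := by simp [hx]
      simp [pvGoA, pvSpec, hx', ih idx hidx hc]

-- B's scatter computes pvSpec: induction carrying the already-built prefix
lemma scatter_eq_spec (bv : List Int) :
    ∀ (ia pref : List Int), bv.count 1 ≤ ia.length →
      ((pvPos bv (pref.length : Int)).zip ia).foldl
          (fun r pv => r.set pv.1.toNat pv.2) (pref ++ List.replicate bv.length 0)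
        = pref ++ pvSpec bv ia := by
  induction bv with
  | nil => intro ia pref _; simp [pvPos, pvSpec]
  | cons x xs ih =>
    intro ia pref hcnt
    rw [pvPos_cons]
    by_cases hx : x = 1
    · subst hx
      obtain ⟨v, rest, rfl⟩ : ∃ v rest, ia = v :: rest := by
        cases ia with
        | nil => simp at hcnt
        | cons v rest => exact ⟨v, rest, rfl⟩
      have hc : xs.count 1 ≤ rest.length := by
        simp at hcnt; omega
      simp only [beq_self_eq_true, if_pos, List.zip_cons_cons, List.foldl_cons,
        List.length_cons, List.replicate_succ]
      have h1 : ((pref.length : Int)).toNat = pref.length := by simp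
      rw [h1, set_mid pref _ 0 v]
      have h2 : (pref ++ v :: List.replicate xs.length 0)
          = (pref ++ [v]) ++ List.replicate xs.length 0 := by simp
      have h3 : ((pref.length : Int) + 1) = (((pref ++ [v]).length : Nat) : Int) := by
        simp
      rw [h2, h3, ih rest (pref ++ [v]) hc]
      simp [pvSpec]
    · have hx' : (x == 1) = false := by simp [hx]
      have hc : xs.count 1 ≤ ia.length := by
        simp [hx] at hcnt ⊢; omega
      simp only [hx', if_neg, Bool.false_eq_true, not_false_iff,
        List.length_cons, List.replicate_succ]
      have h2 : (pref ++ (0 : Int) :: List.replicate xs.length 0)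
          = (pref ++ [0]) ++ List.replicate xs.length 0 := by simp
      have h3 : ((pref.length : Int) + 1) = (((pref ++ [(0 : Int)]).length : Nat) : Int) := by
        simp
      rw [h2, h3, ih ia (pref ++ [0]) hc]
      simp [pvSpec, hx']

-- ===== VERDICT (by name: the statement is the Claim_ definition above) =====
theorem replace_ones_with_integers_spec : Claim_equal_replace_ones_with_integers := by
  intro bv ia _ hpre
  have hpre' : bv.count 1 ≤ ia.length := hpre
  unfold Spec_replace_ones_with_integers replace_ones_with_integers replace_ones_with_integers_alt
  have hA := pvGoA_eq_spec bv ia 0 (Nat.zero_le _) (by simpa using hpre')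
  have hB := scatter_eq_spec bv ia [] (by simpa using hpre')
  have hlen : (((PySem.List.enumerate bv).filter (fun p => p.2 == 1)).map Prod.fst).length
      = bv.count 1 := pvPos_length bv 0
  have hguard : ¬ ia.length < (((PySem.List.enumerate bv).filter (fun p => p.2 == 1)).map Prod.fst).length := by
    rw [hlen]; omega
  simp only [hguard, if_neg, not_false_iff, hA, Option.getD_some]
  have : ((PySem.List.enumerate bv).filter (fun p => p.2 == 1)).map Prod.fst = pvPos bv 0 := rfl
  rw [this]
  have h0 : pvPos bv 0 = pvPos bv (([] : List Int).length : Int) := by norm_num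
  rw [h0]
  simpa using hB.symm
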